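-- pv_equiv track=rewrite | github.com/muneebalam/scrapenhl2 | scrapenhl2/plot/game_timeline.py | _get_contiguous_times
-- ===== SOURCE A (Python) =====
-- def _get_contiguous_times(times, tolerance=2):
--     """
--     Returns tuples of start and end times inferred from list of all times.
--
--     For example, [1, 2, 3, 5, 6, 7, 10] would yield ((1, 3), (5, 7), (10, 10))
--     :param times: a list or series of ints. Must be sorted ascending.
--     :param tolerance: gaps must be at least this long to be registered. E.g. 2 skips 1-sec shift anomalies
--
--     :return: tuple of tuple-2s of ints
--     """
--     cont_times = []
--     for i in range(len(times)):
--         if i == 0: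
--             cont_times.append([times[i], times[i]])
--         else:
--             if times[i] == times[i - 1] + 1:
--                 cont_times[-1][-1] = times[i]
--             else:
--                 cont_times.append([times[i], times[i]])
--     cont_times = tuple((s, e) for s, e in cont_times if e - s >= tolerance)
--     return cont_times
-- ===== SOURCE B (Python) =====
-- def _get_contiguous_times(times, tolerance=2):
--     ts = list(times)
--     if not ts:
--         return ()
--     starts = [ts[0]] + [x for p, x in zip(ts, ts[1:]) if x != p + 1]
--     ends = [x for x, n in zip(ts, ts[1:]) if n != x + 1] + [ts[-1]]
--     return tuple((s, e) for s, e in zip(starts, ends) if e - s >= tolerance)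
-- ===== Notes on version B (the rewrite author's own statement) =====
-- stated objective: alternative
-- what changed: Replaced the stateful index loop that appends runs and mutates the last run's end with a stateless decomposition: run starts and run ends are each computed by a pairwise zip(ts, ts[1:]) comprehension and then zipped together before the same tolerance filter.
import Mathlib
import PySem

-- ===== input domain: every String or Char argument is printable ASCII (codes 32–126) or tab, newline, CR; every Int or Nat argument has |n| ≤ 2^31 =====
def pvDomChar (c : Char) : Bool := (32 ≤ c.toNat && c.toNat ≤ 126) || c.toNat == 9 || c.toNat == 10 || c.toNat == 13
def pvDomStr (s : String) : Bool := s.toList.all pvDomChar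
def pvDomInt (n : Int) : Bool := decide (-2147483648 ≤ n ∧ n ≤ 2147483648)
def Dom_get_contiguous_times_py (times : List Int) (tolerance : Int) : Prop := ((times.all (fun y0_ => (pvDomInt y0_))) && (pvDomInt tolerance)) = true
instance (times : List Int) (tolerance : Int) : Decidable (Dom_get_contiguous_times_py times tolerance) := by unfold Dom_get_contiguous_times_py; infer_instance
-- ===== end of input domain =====

-- B replaces A's stateful run-mutating index loop by zipping two pairwise-comprehension
-- boundary lists (run starts / run ends); same values everywhere, no speed claim.

-- ===== PORT A =====
-- cont_times[-1][-1] = v ; A's loop only reaches this with a nonempty accumulator,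
-- so the total getD default is never the result.
def pvSetLastEnd (acc : List (Int × Int)) (v : Int) : List (Int × Int) :=
  acc.dropLast ++ [((acc.getLast?.getD (0, 0)).1, v)]

-- one iteration of A's 'for i in range(len(times))' body
def pvAStep (times : List Int) (acc : List (Int × Int)) (i : Int) : List (Int × Int) :=
  if i = 0 then
    acc ++ [(PySem.List.pyGetD times i 0, PySem.List.pyGetD times i 0)]
  else if PySem.List.pyGetD times i 0 = PySem.List.pyGetD times (i - 1) 0 + 1 then
    pvSetLastEnd acc (PySem.List.pyGetD times i 0)
  else
    acc ++ [(PySem.List.pyGetD times i 0, PySem.List.pyGetD times i 0)]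

def get_contiguous_times_py (times : List Int) (tolerance : Int) : List (Int × Int) :=
  ((PySem.List.pyRange 0 (times.length : Int) 1).foldl (pvAStep times) []).filter
    (fun p => decide (tolerance ≤ p.2 - p.1))

-- ===== PORT B =====
-- [x for p, x in zip(ts, ts[1:]) if x != p + 1]
def pvFS (px : Int × Int) : Option Int := if px.2 ≠ px.1 + 1 then some px.2 else none
-- [x for x, n in zip(ts, ts[1:]) if n != x + 1]
def pvFE (px : Int × Int) : Option Int := if px.2 ≠ px.1 + 1 then some px.1 else none

def get_contiguous_times_py_alt (times : List Int) (tolerance : Int) : List (Int × Int) :=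
  match times with
  | [] => []
  | t :: rest =>
    let pairs := (t :: rest).zip rest   -- zip(ts, ts[1:]); ts[1:] of t::rest is rest
    let starts := t :: pairs.filterMap pvFS
    let ends := pairs.filterMap pvFE ++ [PySem.List.pyGetD (t :: rest) (-1) 0]  -- ts[-1]
    (starts.zip ends).filter (fun p => decide (tolerance ≤ p.2 - p.1))

-- ===== PRECONDITION & SPEC =====
def Spec_get_contiguous_times_py (times : List Int) (tolerance : Int) (out : List (Int × Int)) : Prop := out = get_contiguous_times_py_alt times tolerance
instance (times : List Int) (tolerance : Int) (out : List (Int × Int)) : Decidable (Spec_get_contiguous_times_py times tolerance out) := by unfold Spec_get_contiguous_times_py; infer_instance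

-- ===== CLAIM (what is proved, stated in full; the proofs are below) =====
def Claim_equal_get_contiguous_times_py : Prop := ∀ (times : List Int) (tolerance : Int), Dom_get_contiguous_times_py times tolerance → Spec_get_contiguous_times_py times tolerance (get_contiguous_times_py times tolerance)

-- ===== LEMMAS AND PROOFS =====

-- canonical front-to-back run builder both ports are reduced to
def pvLoop (s e : Int) : List Int → List (Int × Int)
  | [] => [(s, e)]
  | y :: ys => if y = e + 1 then pvLoop s y ys else (s, e) :: pvLoop y y ys

theorem pvLoop_congr (xs : List Int) : ∀ (e s s' w : Int) (r : List (Int × Int)),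
    pvLoop s e xs = (s, w) :: r → pvLoop s' e xs = (s', w) :: r := by
  induction xs with
  | nil =>
    intro e s s' w r h
    simp [pvLoop] at h ⊢
    exact h
  | cons y ys ih =>
    intro e s s' w r h
    by_cases hy : y = e + 1
    · simp only [pvLoop, if_pos hy] at h ⊢; exact ih y s s' w r h
    · simp [pvLoop, hy] at h ⊢
      exact h

theorem pvFoldA_inv (ts : List Int) (d : List Int) : ∀ (k : Nat) (pre : List (Int × Int)) (s e : Int),
    1 ≤ k → ts.drop k = d → ts[k - 1]?.getD 0 = e →
    (PySem.List.pyRange (k : Int) (ts.length : Int) 1).foldl (pvAStep ts) (pre ++ [(s, e)]) =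
      pre ++ pvLoop s e d := by
  induction d with
  | nil =>
    intro k pre s e hk hd _
    have hlen : ts.length ≤ k := by
      have := congrArg List.length hd
      simp at this; omega
    rw [PySem.List.pyRange_one_eq_nil (by exact_mod_cast hlen)]
    simp [pvLoop]
  | cons y ys ih =>
    intro k pre s e hk hd he
    have hklen : k < ts.length := by
      have hl := congrArg List.length hd
      simp [List.length_drop] at hl; omega
    have hk0 : ¬ (k = 0) := by omega
    have h1 : ts[k]? = some y := by
      have h0 : (ts.drop k)[0]? = some y := by rw [hd]; rfl
      rw [List.getElem?_drop] at h0; simpa using h0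
    have hy : ts[k]?.getD 0 = y := by rw [h1]; rfl
    have hcast : ((k : Int) - 1) = ((k - 1 : Nat) : Int) := by omega
    have hdrop : ts.drop (k + 1) = ys := by
      have := congrArg List.tail hd
      rwa [List.tail_drop] at this
    rw [PySem.List.pyRange_one_cons (by exact_mod_cast hklen)]
    rw [List.foldl_cons]
    rw [show ((k : Int) + 1) = ((k + 1 : Nat) : Int) by push_cast; ring]
    by_cases hmerge : y = e + 1
    · have hstep : pvAStep ts (pre ++ [(s, e)]) (k : Int) = pre ++ [(s, y)] := by
        simp [pvAStep, hk0, hcast, hy, he, hmerge, pvSetLastEnd]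
      rw [hstep, ih (k + 1) pre s y (by omega) hdrop (by simpa using hy)]
      simp [pvLoop, hmerge]
    · have hstep : pvAStep ts (pre ++ [(s, e)]) (k : Int) = (pre ++ [(s, e)]) ++ [(y, y)] := by
        simp [pvAStep, hk0, hcast, hy, he, hmerge]
      rw [hstep, ih (k + 1) (pre ++ [(s, e)]) y y (by omega) hdrop (by simpa using hy)]
      simp [pvLoop, hmerge]

theorem pvFoldA_eq (t : Int) (rest : List Int) :
    (PySem.List.pyRange 0 ((t :: rest).length : Int) 1).foldl (pvAStep (t :: rest)) [] =
      pvLoop t t rest := by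
  have hlen : (0 : Int) < ((t :: rest).length : Int) := by
    simp
  rw [PySem.List.pyRange_one_cons hlen, List.foldl_cons]
  have h0 : pvAStep (t :: rest) [] 0 = [] ++ [(t, t)] := by
    simp [pvAStep, PySem.List.pyGetD_zero_cons]
  rw [h0]
  have := pvFoldA_inv (t :: rest) rest 1 [] t t (le_refl 1) (by simp) (by rfl)
  simpa using this

-- ts[-1] of a cons-of-cons ignores the head
theorem pvLast_cons (x y : Int) (ys : List Int) :
    PySem.List.pyGetD (x :: y :: ys) (-1) 0 = PySem.List.pyGetD (y :: ys) (-1) 0 := by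
  rw [PySem.List.pyGetD_neg_one (x :: y :: ys) 0 (by simp),
      PySem.List.pyGetD_neg_one (y :: ys) 0 (by simp)]
  exact List.getLast_cons (by simp)

theorem pvB_zip (xs : List Int) : ∀ (x : Int),
    ((x :: ((x :: xs).zip xs).filterMap pvFS).zip
      (((x :: xs).zip xs).filterMap pvFE ++ [PySem.List.pyGetD (x :: xs) (-1) 0])) =
      pvLoop x x xs := by
  induction xs with
  | nil =>
    intro x
    simp [pvLoop, PySem.List.pyGetD_neg_one _ _ (by simp : ([x] : List Int) ≠ [])]
  | cons y ys ih =>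
    intro x
    have hzip : ((x :: y :: ys).zip (y :: ys)) = (x, y) :: ((y :: ys).zip ys) := rfl
    rw [hzip, pvLast_cons]
    by_cases h : y = x + 1
    · have hS : pvFS (x, y) = none := by simp [pvFS, h]
      have hE : pvFE (x, y) = none := by simp [pvFE, h]
      rw [List.filterMap_cons, hS, List.filterMap_cons, hE]
      obtain ⟨w, rst, hwr⟩ : ∃ w rst,
          ((y :: ys).zip ys).filterMap pvFE ++ [PySem.List.pyGetD (y :: ys) (-1) 0] = w :: rst := by
        cases hE' : ((y :: ys).zip ys).filterMap pvFE with
        | nil => exact ⟨PySem.List.pyGetD (y :: ys) (-1) 0, [], by simp⟩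
        | cons a l => exact ⟨a, l ++ [PySem.List.pyGetD (y :: ys) (-1) 0], by simp⟩
      have ihx := ih y
      rw [hwr] at ihx ⊢
      rw [List.zip_cons_cons] at ihx ⊢
      simp only [pvLoop, if_pos h]
      exact (pvLoop_congr ys y y x w _ ihx.symm).symm
    · have hS : pvFS (x, y) = some y := by simp [pvFS, h]
      have hE : pvFE (x, y) = some x := by simp [pvFE, h]
      rw [List.filterMap_cons, hS, List.filterMap_cons, hE]
      simp only [List.cons_append, List.zip_cons_cons]
      rw [ih y]
      simp [pvLoop, h]

-- ===== VERDICT (by name: the statement is the Claim_ definition above) =====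
theorem get_contiguous_times_py_spec : Claim_equal_get_contiguous_times_py := by
  intro times tolerance _
  unfold Spec_get_contiguous_times_py
  cases times with
  | nil => rfl
  | cons t rest =>
    have hB : get_contiguous_times_py_alt (t :: rest) tolerance =
        ((t :: ((t :: rest).zip rest).filterMap pvFS).zip
          (((t :: rest).zip rest).filterMap pvFE ++ [PySem.List.pyGetD (t :: rest) (-1) 0])).filter
          (fun p => decide (tolerance ≤ p.2 - p.1)) := rfl
    rw [hB]
    unfold get_contiguous_times_py
    rw [pvFoldA_eq, pvB_zip rest t]
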